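-- pv_equiv track=rewrite | github.com/youngjinss/Korean-Bias-SAE | src/visualization/feature_selection.py | get_shared_features
-- ===== SOURCE A (Python) =====
-- from typing import Dict, List, Tuple, Optional
--
-- def get_shared_features(
--     demographic2features: Dict[str, List[int]],
--     min_demographics: int = 2
-- ) -> List[int]:
--     """
--     Find features shared across multiple demographics.
--
--     Args:
--         demographic2features: Map of demographics to feature lists
--         min_demographics: Minimum number of demographics to appear in
--
--     Returns:
--         List of shared feature indices
--     """
--     from collections import Counter
--
--     # Count feature occurrences
--     feature_counts = Counter()
--     for features in demographic2features.values():
--         feature_counts.update(features)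
--
--     # Filter by minimum count
--     shared_features = [fid for fid, count in feature_counts.items()
--                       if count >= min_demographics]
--
--     return sorted(shared_features)
-- ===== SOURCE B (Python) =====
-- def get_shared_features(demographic2features, min_demographics=2):
--     """Sort-and-group counting: flatten all feature lists, sort once, then a
--     single run-length scan emits each value whose run is long enough (output
--     is already ascending, so no final sort)."""
--     flat = sorted(f for feats in demographic2features.values() for f in feats)
--     if not flat:
--         return []
--     result = []
--     cur, cnt = flat[0], 1
--     for x in flat[1:]:
--         if x == cur:
--             cnt += 1
--         else:
--             if cnt >= min_demographics:
--                 result.append(cur)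
--             cur, cnt = x, 1
--     if cnt >= min_demographics:
--         result.append(cur)
--     return result
-- ===== Notes on version B (the rewrite author's own statement) =====
-- stated objective: alternative
-- what changed: Replaces Counter hash-counting followed by a final sort with flatten-then-sort and a single run-length scan over the sorted list that emits values whose run length reaches min_demographics, producing the output already in ascending order.
import Mathlib
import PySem

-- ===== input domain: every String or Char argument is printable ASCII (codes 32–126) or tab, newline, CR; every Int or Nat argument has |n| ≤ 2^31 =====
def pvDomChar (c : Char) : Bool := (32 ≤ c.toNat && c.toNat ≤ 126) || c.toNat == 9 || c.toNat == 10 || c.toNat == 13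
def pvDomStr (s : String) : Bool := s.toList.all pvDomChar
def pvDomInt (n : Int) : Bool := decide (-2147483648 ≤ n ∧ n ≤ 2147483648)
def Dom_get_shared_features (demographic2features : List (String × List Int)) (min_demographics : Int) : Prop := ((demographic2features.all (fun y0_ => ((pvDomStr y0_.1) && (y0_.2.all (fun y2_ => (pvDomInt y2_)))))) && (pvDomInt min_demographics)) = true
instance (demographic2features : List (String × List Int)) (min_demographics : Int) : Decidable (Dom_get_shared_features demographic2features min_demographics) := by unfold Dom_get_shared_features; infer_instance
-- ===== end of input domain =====

-- B differs from A in algorithm only (sort-and-group instead of Counter); same value everywhere.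

-- ===== PORT A =====
-- Counter() updated per demographic, filter by count, then sorted.
def get_shared_features (demographic2features : List (String × List Int)) (min_demographics : Int) : List Int :=
  let feature_counts : PySem.Dict Int Int :=
    ((PySem.Dict.ofList demographic2features).values).foldl
      (fun c features => features.foldl (fun c x => c.modify x 0 (· + 1)) c)
      PySem.Dict.empty
  let shared_features : List Int :=
    (feature_counts.items.filter (fun p => decide (min_demographics ≤ p.2))).map Prod.fst
  PySem.List.sorted shared_features (fun x => x) false

-- ===== PORT B =====
-- run-length scan over the sorted flat list: (cur, cnt) state, emit cur when its run ends
def pvRunGo (m cur cnt : Int) : List Int → List Int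
  | [] => if m ≤ cnt then [cur] else []
  | x :: rest =>
      if x = cur then pvRunGo m cur (cnt + 1) rest
      else (if m ≤ cnt then [cur] else []) ++ pvRunGo m x 1 rest

def get_shared_features_alt (demographic2features : List (String × List Int)) (min_demographics : Int) : List Int :=
  match PySem.List.sorted ((PySem.Dict.ofList demographic2features).values.flatten) (fun x => x) false with
  | [] => []
  | x :: rest => pvRunGo min_demographics x 1 rest

-- ===== PRECONDITION & SPEC =====
def Spec_get_shared_features (demographic2features : List (String × List Int)) (min_demographics : Int) (out : List Int) : Prop := out = get_shared_features_alt demographic2features min_demographics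
instance (demographic2features : List (String × List Int)) (min_demographics : Int) (out : List Int) : Decidable (Spec_get_shared_features demographic2features min_demographics out) := by unfold Spec_get_shared_features; infer_instance

-- ===== CLAIM (what is proved, stated in full; the proofs are below) =====
def Claim_equal_get_shared_features : Prop := ∀ (demographic2features : List (String × List Int)) (min_demographics : Int), Dom_get_shared_features demographic2features min_demographics → Spec_get_shared_features demographic2features min_demographics (get_shared_features demographic2features min_demographics)

-- ===== LEMMAS AND PROOFS =====

-- every emitted value occurs in the scanned run list
theorem pvRunGo_subset (m : Int) : ∀ (rest : List Int) (x cnt k : Int),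
    k ∈ pvRunGo m x cnt rest → k ∈ x :: rest := by
  intro rest
  induction rest with
  | nil =>
    intro x cnt k h
    simp only [pvRunGo] at h
    split at h <;> simp_all
  | cons y t ih =>
    intro x cnt k h
    simp only [pvRunGo] at h
    by_cases hyx : y = x
    · subst hyx
      simp only [if_pos rfl] at h
      have := ih y (cnt + 1) k h
      simp_all
    · rw [if_neg hyx] at h
      rcases List.mem_append.mp h with h1 | h2
      · split at h1 <;> simp_all
      · have := ih y 1 k h2
        simp_all

-- membership in the scan output: present and (adjusted) multiplicity at least m
theorem pvRunGo_mem (m : Int) : ∀ (rest : List Int) (x cnt k : Int),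
    (x :: rest).Pairwise (· ≤ ·) → 1 ≤ cnt →
    (k ∈ pvRunGo m x cnt rest ↔
      k ∈ x :: rest ∧ m ≤ (if k = x then cnt - 1 else 0) + ((x :: rest).count k : Int)) := by
  intro rest
  induction rest with
  | nil =>
    intro x cnt k _ hc
    simp only [pvRunGo]
    by_cases hk : k = x
    · subst hk
      split <;> simp [List.count_cons] <;> omega
    · split <;> simp [List.count_cons, hk, fun e : x = k => hk e.symm]
  | cons y t ih =>
    intro x cnt k h hc
    have hxy : x ≤ y := (List.pairwise_cons.mp h).1 y (by simp)
    have ht : (y :: t).Pairwise (· ≤ ·) := (List.pairwise_cons.mp h).2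
    simp only [pvRunGo]
    by_cases hyx : y = x
    · subst hyx
      rw [if_pos rfl]
      have hxt : (y :: t).Pairwise (· ≤ ·) := h.sublist ((List.sublist_cons_self y t).cons₂ y)
      rw [ih y (cnt + 1) k hxt (by omega)]
      by_cases hk : k = y
      · subst hk
        simp only [List.mem_cons, true_or, true_and, List.count_cons_self]
        push_cast
        omega
      · have hc : ∀ l : List Int, List.count k (y :: l) = List.count k l := fun l => by
          simp [List.count_cons, Ne.symm hk]
        simp [hc, hk]
    · rw [if_neg hyx]
      have hxlt : x < y := lt_of_le_of_ne hxy (fun e => hyx e.symm)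
      have hxnot : x ∉ y :: t := by
        intro hmem
        rcases List.mem_cons.mp hmem with h1 | h1
        · exact hyx h1.symm
        · have := (List.pairwise_cons.mp ht).1 x h1
          omega
      have hcnt0 : (y :: t).count x = 0 := List.count_eq_zero.mpr hxnot
      rw [List.mem_append, ih y 1 k ht (by omega)]
      constructor
      · rintro (h1 | ⟨hm1, hm2⟩)
        · have hx1 : k = x ∧ m ≤ cnt := by split at h1 <;> simp_all
          obtain ⟨rfl, hm⟩ := hx1
          refine ⟨by simp, ?_⟩
          simp only [List.count_cons, hcnt0]
          simp
          omega
        · have hky : k ≠ x := fun e => hxnot (e ▸ hm1)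
          refine ⟨List.mem_cons_of_mem _ hm1, ?_⟩
          have h0 : (if k = y then (1:Int) - 1 else 0) = 0 := by split <;> ring
          rw [h0, zero_add] at hm2
          have hcc : (x :: y :: t).count k = (y :: t).count k := by
            have hne : ¬ (x = k) := fun e => hky e.symm
            simp [List.count_cons, hne]
          rw [if_neg hky, hcc, zero_add]
          exact hm2
      · rintro ⟨hmem, hcount⟩
        by_cases hk : k = x
        · subst hk
          left
          simp only [List.count_cons, hcnt0] at hcount
          simp at hcount
          split <;> simp <;> omega
        · right
          have hmem' : k ∈ y :: t := by
            rcases List.mem_cons.mp hmem with h1 | h1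
            · exact absurd h1 hk
            · exact h1
          refine ⟨hmem', ?_⟩
          have hcc : (x :: y :: t).count k = (y :: t).count k := by
            have hne : ¬ (x = k) := fun e => hk e.symm
            simp [List.count_cons, hne]
          rw [if_neg hk, hcc, zero_add] at hcount
          have h0 : (if k = y then (1:Int) - 1 else 0) = 0 := by split <;> ring
          rw [h0, zero_add]
          exact hcount

-- the scan output is strictly increasing
theorem pvRunGo_pairwise (m : Int) : ∀ (rest : List Int) (x cnt : Int),
    (x :: rest).Pairwise (· ≤ ·) →
    (pvRunGo m x cnt rest).Pairwise (· < ·) := by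
  intro rest
  induction rest with
  | nil =>
    intro x cnt _
    simp only [pvRunGo]
    split <;> simp
  | cons y t ih =>
    intro x cnt h
    have hxy : x ≤ y := (List.pairwise_cons.mp h).1 y (by simp)
    have ht : (y :: t).Pairwise (· ≤ ·) := (List.pairwise_cons.mp h).2
    simp only [pvRunGo]
    by_cases hyx : y = x
    · subst hyx
      rw [if_pos rfl]
      exact ih y (cnt + 1) (h.sublist ((List.sublist_cons_self y t).cons₂ y))
    · rw [if_neg hyx]
      have hxlt : x < y := lt_of_le_of_ne hxy (fun e => hyx e.symm)
      have hrun := ih y 1 ht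
      have hcross : ∀ k ∈ pvRunGo m y 1 t, x < k := by
        intro k hk
        rcases List.mem_cons.mp (pvRunGo_subset m t y 1 k hk) with h1 | h1
        · omega
        · have := (List.pairwise_cons.mp ht).1 k h1
          omega
      split
      · exact List.pairwise_cons.mpr ⟨hcross, hrun⟩
      · simpa using hrun

-- ===== VERDICT (by name: the statement is the Claim_ definition above) =====
theorem get_shared_features_spec : Claim_equal_get_shared_features := by
  intro d m _
  unfold Spec_get_shared_features
  set flat0 := ((PySem.Dict.ofList d).values).flatten with hflat0
  -- A's result, rewritten to sorted-filter form
  have hA : get_shared_features d m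
      = PySem.List.sorted
          ((PySem.Set.ofList flat0).filter (fun k => decide (m ≤ (flat0.count k : Int))))
          (fun x => x) false := by
    show PySem.List.sorted
        ((((((PySem.Dict.ofList d).values).foldl
              (fun c features => features.foldl (fun c x => c.modify x 0 (· + 1)) c)
              PySem.Dict.empty)).items.filter (fun p => decide (m ≤ p.2))).map Prod.fst)
        (fun x => x) false = _
    rw [← List.foldl_flatten, ← PySem.Dict.counter_eq_foldl, PySem.Dict.items_counter,
      List.filter_map, List.map_map]
    simp only [Function.comp_def, List.map_id']
    rw [← hflat0]
  rw [hA]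
  unfold get_shared_features_alt
  rcases hs : PySem.List.sorted flat0 (fun x => x) false with _ | ⟨x, rest⟩
  · have h0 : flat0 = [] := (PySem.List.sorted_eq_nil_iff _ _ _).mp hs
    rw [h0]
    rfl
  · have hperm : (x :: rest).Perm flat0 := hs ▸ PySem.List.sorted_perm flat0 (fun x => x) false
    have hpw : (x :: rest).Pairwise (· ≤ ·) := by
      have := PySem.List.sorted_pairwise flat0 (fun x => x)
      rw [hs] at this
      exact this
    set B := pvRunGo m x 1 rest with hB
    have hBpw : B.Pairwise (· < ·) := pvRunGo_pairwise m rest x 1 hpw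
    have hBmem : ∀ k, k ∈ B ↔ k ∈ flat0 ∧ m ≤ (flat0.count k : Int) := by
      intro k
      rw [hB, pvRunGo_mem m rest x 1 k hpw le_rfl]
      constructor
      · intro ⟨h1, h2⟩
        refine ⟨hperm.mem_iff.mp h1, ?_⟩
        rw [← hperm.count_eq]
        split at h2 <;> omega
      · intro ⟨h1, h2⟩
        refine ⟨hperm.mem_iff.mpr h1, ?_⟩
        rw [hperm.count_eq]
        split <;> omega
    have hLmem : ∀ k, k ∈ (PySem.Set.ofList flat0).filter (fun k => decide (m ≤ (flat0.count k : Int))) ↔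
        k ∈ flat0 ∧ m ≤ (flat0.count k : Int) := by
      intro k
      simp [List.mem_filter, PySem.Set.mem_ofList]
    have hBnodup : B.Nodup := hBpw.imp (fun h => ne_of_lt h)
    have hLnodup : ((PySem.Set.ofList flat0).filter (fun k => decide (m ≤ (flat0.count k : Int)))).Nodup :=
      (PySem.Set.nodup_ofList flat0).filter _
    have hperm2 : B.Perm ((PySem.Set.ofList flat0).filter (fun k => decide (m ≤ (flat0.count k : Int)))) :=
      (List.perm_ext_iff_of_nodup hBnodup hLnodup).mpr (fun k => (hBmem k).trans (hLmem k).symm)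
    show _ = pvRunGo m x 1 rest
    rw [← hB]
    exact PySem.List.sorted_eq_of_perm_of_pairwise_lt _ _ (fun x => x) hperm2 hBpw
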